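-- pv_equiv track=rewrite | github.com/naelnaimat-netizen/Sigmanael- | sigmanael/learning/thinking_adapter.py | apply_legal_filter
-- ===== SOURCE A (Python) =====
-- from typing import Dict, List, Any, Optional
--
-- def apply_legal_filter(message: str) -> tuple[bool, Optional[str]]:
--     """Apply legal boundaries to message processing.
--
--     Args:
--         message: Message to check
--
--     Returns:
--         Tuple of (is_acceptable, reason_if_not)
--     """
--     # Check for legal violation indicators
--     legal_keywords = [
--         'copyright infringement', 'piracy', 'hack', 'crack',
--         'steal', 'fraud', 'scam'
--     ]
--
--     message_lower = message.lower()
--     for keyword in legal_keywords: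
--         if keyword in message_lower:
--             return False, f"Request may violate legal boundaries"
--
--     return True, None
-- ===== SOURCE B (Python) =====
-- def apply_legal_filter(message: str):
--     """Single left-to-right pass over positions: at each index, test whether any
--     keyword starts there (startswith with a tuple), instead of one full
--     substring scan per keyword."""
--     legal_keywords = (
--         'copyright infringement', 'piracy', 'hack', 'crack',
--         'steal', 'fraud', 'scam'
--     )
--     m = message.lower()
--     for i in range(len(m)):
--         if m.startswith(legal_keywords, i):
--             return False, "Request may violate legal boundaries"
--     return True, None
-- ===== Notes on version B (the rewrite author's own statement) =====
-- stated objective: alternative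
-- what changed: Replaces A's seven independent full substring scans (one per keyword) with a single left-to-right pass over the positions of the lowered message, testing at each position whether some keyword starts there.
import Mathlib
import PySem

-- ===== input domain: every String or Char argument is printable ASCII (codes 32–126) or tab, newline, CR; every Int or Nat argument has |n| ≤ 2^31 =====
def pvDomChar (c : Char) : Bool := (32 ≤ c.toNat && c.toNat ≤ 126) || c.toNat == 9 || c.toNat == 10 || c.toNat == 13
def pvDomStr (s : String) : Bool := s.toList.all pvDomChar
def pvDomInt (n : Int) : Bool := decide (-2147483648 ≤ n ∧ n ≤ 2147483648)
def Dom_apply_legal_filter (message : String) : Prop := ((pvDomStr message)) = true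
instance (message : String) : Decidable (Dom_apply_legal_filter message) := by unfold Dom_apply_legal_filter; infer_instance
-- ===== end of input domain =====

-- B replaces A's per-keyword substring scans by one pass over the message's positions,
-- testing at each position whether some keyword starts there (objective: alternative).

-- ===== PORT A =====
def kwsA : List String :=
  ["copyright infringement", "piracy", "hack", "crack", "steal", "fraud", "scam"]

-- for keyword in legal_keywords: if keyword in message_lower: return False, reason
def goA : List String → String → Bool × Option String
  | [], _ => (true, none)
  | k :: ks, ml =>
    if PySem.Str.isIn k ml then (false, some "Request may violate legal boundaries")
    else goA ks ml

def apply_legal_filter (message : String) : Bool × Option String :=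
  goA kwsA (PySem.Str.lower message)

-- ===== PORT B =====
def kwsB : List (List Char) :=
  [("copyright infringement" : String).toList, ("piracy" : String).toList,
   ("hack" : String).toList, ("crack" : String).toList,
   ("steal" : String).toList, ("fraud" : String).toList, ("scam" : String).toList]

-- for i in range(len(m)): if m.startswith(legal_keywords, i): return False, reason
-- (index loop over positions ported as structural recursion over the suffix m[i:];
--  startswith with a tuple at position i is 'some keyword isPrefixOf the suffix at i')
def goB : List Char → Bool × Option String
  | [] => (true, none)
  | c :: rest =>
    if kwsB.any (fun k => k.isPrefixOf (c :: rest)) then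
      (false, some "Request may violate legal boundaries")
    else goB rest

def apply_legal_filter_alt (message : String) : Bool × Option String :=
  goB (PySem.Str.lower message).toList

-- ===== PRECONDITION & SPEC =====
def Spec_apply_legal_filter (message : String) (out : Bool × Option String) : Prop := out = apply_legal_filter_alt message
instance (message : String) (out : Bool × Option String) : Decidable (Spec_apply_legal_filter message out) := by unfold Spec_apply_legal_filter; infer_instance

-- ===== CLAIM (what is proved, stated in full; the proofs are below) =====
def Claim_equal_apply_legal_filter : Prop := ∀ (message : String), Dom_apply_legal_filter message → Spec_apply_legal_filter message (apply_legal_filter message)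

-- ===== LEMMAS AND PROOFS =====

theorem goA_eq (ks : List String) (ml : String) :
    goA ks ml = if ks.any (fun k => PySem.Str.isIn k ml) then
        (false, some "Request may violate legal boundaries") else (true, none) := by
  induction ks with
  | nil => simp [goA]
  | cons k ks ih =>
    by_cases h : PySem.Str.isIn k ml = true
    · rw [goA, if_pos h, List.any_cons, h, Bool.true_or, if_pos rfl]
    · have hf : PySem.Str.isIn k ml = false := by
        cases hv : PySem.Str.isIn k ml
        · rfl
        · exact absurd hv h
      rw [goA, if_neg h, ih, List.any_cons, hf, Bool.false_or]

theorem goB_eq (l : List Char) :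
    goB l = if kwsB.any (fun k => PySem.Chars.isIn k l) then
        (false, some "Request may violate legal boundaries") else (true, none) := by
  induction l with
  | nil => decide
  | cons c rest ih =>
    have key : (kwsB.any fun k => PySem.Chars.isIn k (c :: rest))
        = ((kwsB.any fun k => k.isPrefixOf (c :: rest))
            || (kwsB.any fun k => PySem.Chars.isIn k rest)) := by
      rw [Bool.eq_iff_iff]
      simp only [List.any_eq_true, Bool.or_eq_true, PySem.Chars.isIn_iff_infix,
        List.isPrefixOf_iff_prefix, List.infix_cons_iff]
      aesop
    by_cases hp : (kwsB.any fun k => k.isPrefixOf (c :: rest)) = true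
    · rw [goB, if_pos hp, key, hp, Bool.true_or, if_pos rfl]
    · have hf : (kwsB.any fun k => k.isPrefixOf (c :: rest)) = false := by
        cases hv : kwsB.any fun k => k.isPrefixOf (c :: rest)
        · rfl
        · exact absurd hv hp
      rw [goB, if_neg hp, ih, key, hf, Bool.false_or]

theorem any_bridge (s : String) :
    kwsA.any (fun k => PySem.Str.isIn k s) = kwsB.any (fun k => PySem.Chars.isIn k s.toList) := by
  simp [kwsA, kwsB, PySem.Str.isIn_eq]

-- ===== VERDICT (by name: the statement is the Claim_ definition above) =====
theorem apply_legal_filter_spec : Claim_equal_apply_legal_filter := by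
  intro message _
  show apply_legal_filter message = apply_legal_filter_alt message
  rw [apply_legal_filter, apply_legal_filter_alt, goA_eq, goB_eq, any_bridge]
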